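-- pv_equiv track=rewrite | github.com/ericmerle3789/Collatz-Junction-Theorem | scripts/research/r38_coupling_principle.py | compute_S
-- ===== SOURCE A (Python) =====
-- from math import comb, gcd, ceil, log2, log
--
-- def compute_S(k):
--     """Minimal S such that 2^S > 3^k. Exact via integer comparison."""
--     S = ceil(k * log2(3))
--     three_k = 3 ** k
--     while (1 << S) <= three_k:
--         S += 1
--     while S > 0 and (1 << (S - 1)) > three_k:
--         S -= 1
--     return S
-- ===== SOURCE B (Python) =====
-- def compute_S(k):
--     """Minimal S such that two**S exceeds three**k: the bit length of three**k."""
--     return (3 ** k).bit_length()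
-- ===== Notes on version B (the rewrite author's own statement) =====
-- stated objective: simpler
-- what changed: B returns the bit length of three-to-the-k directly instead of A's float-log estimate followed by two correcting shift loops; for a positive integer that is not a power of two (a power of three never is), the bit length is exactly the minimal exponent whose power of two exceeds it, and the zero-exponent boundary also agrees.
import Mathlib
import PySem

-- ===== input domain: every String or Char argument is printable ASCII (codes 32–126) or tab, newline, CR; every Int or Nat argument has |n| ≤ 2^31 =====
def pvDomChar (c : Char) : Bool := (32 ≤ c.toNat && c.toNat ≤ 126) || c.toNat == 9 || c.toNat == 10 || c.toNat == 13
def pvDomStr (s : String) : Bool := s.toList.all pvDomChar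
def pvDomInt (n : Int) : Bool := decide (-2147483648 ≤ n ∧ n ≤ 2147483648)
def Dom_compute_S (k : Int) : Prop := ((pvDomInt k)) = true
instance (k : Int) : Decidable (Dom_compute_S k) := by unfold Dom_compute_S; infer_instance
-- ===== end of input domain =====

-- B replaces A's float-log estimate plus two correcting shift loops by (3**k).bit_length(); objective: simpler.

-- ===== PORT A =====
-- first while loop: while (1 << S) <= three_k: S += 1
def pvUpA (t S : Nat) : Nat :=
  if 2 ^ S ≤ t then pvUpA t (S + 1) else S
termination_by t + 1 - 2 ^ S
decreasing_by
  have h1 : 2 ^ S < 2 ^ (S + 1) := Nat.pow_lt_pow_right (by omega) (by omega)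
  omega

-- second while loop: while S > 0 and (1 << (S - 1)) > three_k: S -= 1
def pvDownA (t S : Nat) : Nat :=
  if S > 0 ∧ t < 2 ^ (S - 1) then pvDownA t (S - 1) else S
termination_by S
decreasing_by omega

-- S = ceil(k * log2(3)): Python computes this with IEEE doubles; ported as an exact
-- integer approximation (⌈k·1585/1000⌉).  This is the one non-exact step: A's return
-- value is provably independent of the start (any start ≥ 0 is corrected by the two
-- loops to the same minimal S), so the port is exact at the output level.
def pvCeilEst (n : Nat) : Nat := (n * 1585 + 999) / 1000

-- Python A raises ValueError (negative shift) for k < 0; the `if k < 0` guard only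
-- makes the Lean definition total there (outside Pre_).
def compute_S (k : Int) : Int :=
  if k < 0 then 0
  else
    let n := k.toNat
    let S := pvCeilEst n
    let three_k := 3 ^ n
    ((pvDownA three_k (pvUpA three_k S)) : Int)

-- ===== PORT B =====
-- int.bit_length(), ported as the standard halving loop (tail-recursive so it evaluates);
-- proved equal to Mathlib's Nat.size below.  Python B raises AttributeError for k < 0 (outside Pre_).
def pvBitLen (n acc : Nat) : Nat :=
  if n = 0 then acc else pvBitLen (n / 2) (acc + 1)

def compute_S_alt (k : Int) : Int :=
  if k < 0 then 0 else ((pvBitLen (3 ^ k.toNat) 0) : Int)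

-- ===== PRECONDITION & SPEC =====
-- For k < 0, Python A raises ValueError (negative shift count) and Python B raises
-- AttributeError (float has no bit_length); Pre_ excludes exactly those inputs.
def Pre_compute_S (k : Int) : Prop := 0 ≤ k
instance (k : Int) : Decidable (Pre_compute_S k) := by unfold Pre_compute_S; infer_instance
def pvWitness_compute_S : Int := 4

def Spec_compute_S (k : Int) (out : Int) : Prop := out = compute_S_alt k
instance (k : Int) (out : Int) : Decidable (Spec_compute_S k out) := by unfold Spec_compute_S; infer_instance

-- ===== CLAIM (what is proved, stated in full; the proofs are below) =====
def Claim_equal_compute_S : Prop := ∀ (k : Int), Dom_compute_S k → Pre_compute_S k → Spec_compute_S k (compute_S k)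

-- ===== LEMMAS AND PROOFS =====

-- after the first loop, 2^result > t
theorem pvUpA_gt (t S : Nat) : t < 2 ^ (pvUpA t S) := by
  induction S using pvUpA.induct t with
  | case1 S h ih => rw [pvUpA, if_pos h]; exact ih
  | case2 S h => rw [pvUpA, if_neg h]; omega

-- the second loop, started at any S with t < 2^S, yields the bit length of t
theorem pvDownA_size (t S : Nat) (h : t < 2 ^ S) : pvDownA t S = Nat.size t := by
  induction S with
  | zero =>
    rw [pvDownA, if_neg (by omega)]
    interval_cases t
    · simp
  | succ S ih =>
    rw [pvDownA]
    by_cases hc : S + 1 > 0 ∧ t < 2 ^ (S + 1 - 1)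
    · rw [if_pos hc]
      exact ih (by simpa using hc.2)
    · rw [if_neg hc]
      have h2 : 2 ^ S ≤ t := by
        rw [not_and_or] at hc
        rcases hc with hc | hc
        · omega
        · simpa using hc
      have hle : Nat.size t ≤ S + 1 := Nat.size_le.mpr h
      have hlt : S < Nat.size t := Nat.lt_size.mpr h2
      omega

-- Nat.size recurrence, derived from size_le / lt_size
theorem pvSize_div2 (n : Nat) (hn : n ≠ 0) : Nat.size n = Nat.size (n / 2) + 1 := by
  have h1 : n / 2 < 2 ^ Nat.size (n / 2) := Nat.lt_size_self _
  have h2 : n < 2 ^ (Nat.size (n / 2) + 1) := by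
    have : 2 ^ (Nat.size (n / 2) + 1) = 2 * 2 ^ Nat.size (n / 2) := by ring
    omega
  have h3 : 2 ^ Nat.size (n / 2) ≤ n := by
    rcases Nat.eq_zero_or_pos (Nat.size (n / 2)) with h | h
    · simp [h]; omega
    · have h4 : 2 ^ (Nat.size (n / 2) - 1) ≤ n / 2 :=
        Nat.lt_size.mp (by omega)
      have h5 : 2 ^ Nat.size (n / 2) = 2 * 2 ^ (Nat.size (n / 2) - 1) := by
        rw [← pow_succ']; congr 1; omega
      omega
  have hle : Nat.size n ≤ Nat.size (n / 2) + 1 := Nat.size_le.mpr h2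
  have hlt : Nat.size (n / 2) < Nat.size n := Nat.lt_size.mpr h3
  omega

theorem pvBitLen_eq_size (n : Nat) : ∀ acc, pvBitLen n acc = acc + Nat.size n := by
  induction n using Nat.strong_induction_on with
  | _ n ih =>
    intro acc
    rw [pvBitLen]
    by_cases hn : n = 0
    · simp [hn]
    · rw [if_neg hn, ih (n / 2) (by omega) (acc + 1), pvSize_div2 n hn]
      omega

theorem compute_S_spec : Claim_equal_compute_S := by
  intro k _ hk
  have hk0 : 0 ≤ k := hk
  unfold Spec_compute_S compute_S compute_S_alt
  rw [if_neg (by omega), if_neg (by omega)]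
  have := pvDownA_size (3 ^ k.toNat) (pvUpA (3 ^ k.toNat) (pvCeilEst k.toNat))
            (pvUpA_gt _ _)
  simp [this, pvBitLen_eq_size]
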